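-- pv_equiv track=rewrite | github.com/pchaganti/px-nano-agent | cli/display.py | _loop_first
-- ===== SOURCE A (Python) =====
-- from typing import Iterable, Iterator, TypeVar
--
-- T = TypeVar("T")
--
-- def _loop_first(iterable: Iterable[T]) -> Iterator[tuple[bool, T]]:
--     """Yield (is_first, item) for each element."""
--     iterator = iter(iterable)
--     try:
--         first_item = next(iterator)
--     except StopIteration:
--         return
--     yield True, first_item
--     for item in iterator:
--         yield False, item
-- ===== SOURCE B (Python) =====
-- def _loop_first(iterable):
--     """Yield (is_first, item) for each element."""
--     items = list(iterable)
--     flags = ([True] + [False] * (len(items) - 1)) if items else []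
--     yield from zip(flags, items)
-- ===== Notes on version B (the rewrite author's own statement) =====
-- stated objective: alternative
-- what changed: Replaces A's single marking pass (peel-first via iter()/next()/StopIteration then a tail loop) with staged passes: materialize the items, build a parallel boolean flag list [True]+[False]*(n-1), and zip the two lists together.
import Mathlib
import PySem

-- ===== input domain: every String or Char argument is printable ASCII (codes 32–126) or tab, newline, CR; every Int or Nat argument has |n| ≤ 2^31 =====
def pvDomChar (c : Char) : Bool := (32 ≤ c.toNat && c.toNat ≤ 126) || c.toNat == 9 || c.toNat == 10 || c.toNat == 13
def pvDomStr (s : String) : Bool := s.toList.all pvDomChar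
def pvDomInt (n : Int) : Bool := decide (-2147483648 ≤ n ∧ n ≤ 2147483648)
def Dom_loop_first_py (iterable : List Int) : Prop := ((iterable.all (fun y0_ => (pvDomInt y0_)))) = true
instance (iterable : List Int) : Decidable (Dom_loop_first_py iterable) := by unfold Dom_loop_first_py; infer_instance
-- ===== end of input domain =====

-- B replaces A's single marking pass (peel-first then tail loop) with staged passes: build a
-- parallel flag list [True]+[False]*(n-1) and zip it with the items (objective: alternative).

-- ===== PORT A =====
-- transliteration of A: peel the first element (empty → no yields), yield (True, first), then (False, item) for the rest
def loop_first_py_rest (iterator : List Int) : List (Bool × Int) :=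
  match iterator with
  | [] => []
  | item :: rest => (false, item) :: loop_first_py_rest rest

def loop_first_py (iterable : List Int) : List (Bool × Int) :=
  match iterable with
  | [] => []  -- StopIteration on next(iterator): return
  | first_item :: iterator => (true, first_item) :: loop_first_py_rest iterator

-- ===== PORT B =====
-- transliteration of B: materialize items, build flags = [True] + [False]*(n-1), zip flags with items
def loop_first_py_alt (iterable : List Int) : List (Bool × Int) :=
  let items := iterable
  let flags := if items = [] then [] else [true] ++ List.replicate (items.length - 1) false
  flags.zip items

-- ===== PRECONDITION & SPEC =====
def Spec_loop_first_py (iterable : List Int) (out : List (Bool × Int)) : Prop := out = loop_first_py_alt iterable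
instance (iterable : List Int) (out : List (Bool × Int)) : Decidable (Spec_loop_first_py iterable out) := by unfold Spec_loop_first_py; infer_instance

-- ===== CLAIM (what is proved, stated in full; the proofs are below) =====
def Claim_equal_loop_first_py : Prop := ∀ (iterable : List Int), Dom_loop_first_py iterable → Spec_loop_first_py iterable (loop_first_py iterable)

-- ===== LEMMAS AND PROOFS =====
theorem rest_eq_zip_replicate (l : List Int) :
    loop_first_py_rest l = (List.replicate l.length false).zip l := by
  induction l with
  | nil => simp [loop_first_py_rest]
  | cons a t ih => simp [loop_first_py_rest, List.replicate_succ, ih]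

-- ===== VERDICT (by name: the statement is the Claim_ definition above) =====
theorem loop_first_py_spec : Claim_equal_loop_first_py := by
  intro iterable _
  unfold Spec_loop_first_py loop_first_py loop_first_py_alt
  cases iterable with
  | nil => simp
  | cons a t => simp [rest_eq_zip_replicate]
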